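-- pv_equiv track=rewrite | github.com/GiantCroissant-Lunar/fantasim-world | scripts/sync_rules.py | demote_headings
-- ===== SOURCE A (Python) =====
-- def demote_headings(content: str) -> str:
--     """Demote all headings by one level (# -> ##) for concatenated files."""
--     lines = content.split("\n")
--     result = []
--     for line in lines:
--         # Only demote lines that start with # (headings)
--         if line.startswith("#") and not line.startswith("##"):
--             result.append("#" + line)
--         else:
--             result.append(line)
--     return "\n".join(result)
-- ===== SOURCE B (Python) =====
-- def demote_headings(content: str) -> str:
--     """Demote all headings by one level (# -> ##) for concatenated files."""
--     out = []
--     at_start = True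
--     n = len(content)
--     for i, ch in enumerate(content):
--         nxt = content[i + 1] if i + 1 < n else ""
--         if at_start and ch == "#" and nxt != "#":
--             out.append("#")
--         out.append(ch)
--         at_start = ch == "\n"
--     return "".join(out)
-- ===== Notes on version B (the rewrite author's own statement) =====
-- stated objective: alternative
-- what changed: B replaces the split-into-lines / per-line conditional rebuild / join pipeline with a single character-level pass that carries a line-start flag and inserts one extra hash character at each line start that begins a level-1 heading, peeking at the next character to leave deeper headings unchanged.
import Mathlib
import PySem

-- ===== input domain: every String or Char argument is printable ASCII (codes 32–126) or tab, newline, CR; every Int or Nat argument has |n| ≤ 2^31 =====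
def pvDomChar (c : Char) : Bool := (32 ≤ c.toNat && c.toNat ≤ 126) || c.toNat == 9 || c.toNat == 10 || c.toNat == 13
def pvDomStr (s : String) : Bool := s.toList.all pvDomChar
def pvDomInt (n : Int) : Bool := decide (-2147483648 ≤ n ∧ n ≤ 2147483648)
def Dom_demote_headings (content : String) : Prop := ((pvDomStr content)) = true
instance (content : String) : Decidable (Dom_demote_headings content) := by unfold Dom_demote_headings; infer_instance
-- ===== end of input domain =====

-- B replaces A's split-into-lines / per-line rebuild / join with a single character-level pass
-- carrying a line-start flag; same return value on every input, no speed claim.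

-- ===== PORT A =====
-- literal port of A: split on '\n', per-line conditional prepend into an accumulator list, join with '\n'
def demote_headings (content : String) : String :=
  let lines := PySem.Chars.splitOn content.toList ['\n']
  let result := lines.foldl (fun result line =>
    result ++ [if PySem.Chars.startswith line ['#'] && !(PySem.Chars.startswith line ['#', '#'])
               then '#' :: line else line]) []
  String.ofList (PySem.Chars.join ['\n'] result)

-- ===== PORT B =====
-- literal port of B: one pass over the characters, at_start flag, peek at the next character
def demoteGo : Bool → List Char → List Char
  | _, [] => []
  | atStart, c :: rest =>
    if atStart && c == '#' && !(rest.head? == some '#')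
    then '#' :: c :: demoteGo (c == '\n') rest
    else c :: demoteGo (c == '\n') rest

def demote_headings_alt (content : String) : String :=
  String.ofList (demoteGo true content.toList)

-- ===== PRECONDITION & SPEC =====
def Spec_demote_headings (content : String) (out : String) : Prop := out = demote_headings_alt content
instance (content : String) (out : String) : Decidable (Spec_demote_headings content out) := by unfold Spec_demote_headings; infer_instance

-- ===== CLAIM (what is proved, stated in full; the proofs are below) =====
def Claim_equal_demote_headings : Prop := ∀ (content : String), Dom_demote_headings content → Spec_demote_headings content (demote_headings content)

-- ===== LEMMAS AND PROOFS =====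

-- (first line, remaining lines) of a char list, split at '\n'
def lsplit : List Char → List Char × List (List Char)
  | [] => ([], [])
  | c :: rest =>
    if c = '\n' then ([], (lsplit rest).1 :: (lsplit rest).2)
    else (c :: (lsplit rest).1, (lsplit rest).2)

-- A's per-line transformation
def pvF (line : List Char) : List Char :=
  if PySem.Chars.startswith line ['#'] && !(PySem.Chars.startswith line ['#', '#'])
  then '#' :: line else line

theorem foldl_append_singleton {α β : Type} (g : α → β) :
    ∀ (l : List α) (acc : List β),
      l.foldl (fun r x => r ++ [g x]) acc = acc ++ l.map g := by
  intro l
  induction l with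
  | nil => simp
  | cons x xs ih => intro acc; simp [List.foldl, ih]

theorem splitOn_go_eq :
    ∀ (l : List Char) (fuel : Nat) (cur : List Char) (acc : List (List Char)),
      l.length < fuel →
      PySem.Chars.splitOn.go ['\n'] fuel l cur acc =
        acc.reverse ++ (cur.reverse ++ (lsplit l).1) :: (lsplit l).2 := by
  intro l
  induction l with
  | nil =>
    intro fuel cur acc h
    match fuel, h with
    | fuel + 1, _ => simp [PySem.Chars.splitOn.go, lsplit]
  | cons c rest ih =>
    intro fuel cur acc h
    match fuel, h with
    | fuel + 1, h =>
      have hrest : rest.length < fuel := by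
        simp [List.length_cons] at h; omega
      by_cases hc : c = '\n'
      · subst hc
        rw [show PySem.Chars.splitOn.go ['\n'] (fuel + 1) ('\n' :: rest) cur acc =
              PySem.Chars.splitOn.go ['\n'] fuel rest [] (cur.reverse :: acc) by
            simp [PySem.Chars.splitOn.go, List.isPrefixOf]]
        rw [ih fuel [] (cur.reverse :: acc) hrest]
        simp [lsplit]
      · rw [show PySem.Chars.splitOn.go ['\n'] (fuel + 1) (c :: rest) cur acc =
              PySem.Chars.splitOn.go ['\n'] fuel rest (c :: cur) acc by
            simp [PySem.Chars.splitOn.go, List.isPrefixOf, Ne.symm hc]]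
        rw [ih fuel (c :: cur) acc hrest]
        simp [lsplit, hc]

theorem splitOn_eq (cs : List Char) :
    PySem.Chars.splitOn cs ['\n'] = (lsplit cs).1 :: (lsplit cs).2 := by
  have := splitOn_go_eq cs (cs.length + 1) [] [] (Nat.lt_succ_self _)
  simpa [PySem.Chars.splitOn] using this

theorem join_cons_head (sep : List Char) (c : Char) (h : List Char) (r : List (List Char)) :
    PySem.Chars.join sep ((c :: h) :: r) = c :: PySem.Chars.join sep (h :: r) := by
  cases r with
  | nil => simp [PySem.Chars.join_singleton]
  | cons q r' => simp [PySem.Chars.join_cons_cons]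

theorem join_nil_cons (q : List Char) (r : List (List Char)) :
    PySem.Chars.join ['\n'] ([] :: q :: r) = '\n' :: PySem.Chars.join ['\n'] (q :: r) := by
  simp [PySem.Chars.join_cons_cons]

theorem prefix_hash (l : List Char) : ['#'].isPrefixOf l = (l.head? == some '#') := by
  cases l with
  | nil => rfl
  | cons a t => simp [List.isPrefixOf, eq_comm]

theorem head_hash (rest : List Char) :
    ((lsplit rest).1.head? == some '#') = (rest.head? == some '#') := by
  cases rest with
  | nil => rfl
  | cons d r =>
    by_cases hd : d = '\n'
    · subst hd; simp [lsplit]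
    · simp [lsplit, hd]

theorem demoteGo_eq (cs : List Char) :
    demoteGo true cs = PySem.Chars.join ['\n'] (pvF (lsplit cs).1 :: ((lsplit cs).2).map pvF)
  ∧ demoteGo false cs = PySem.Chars.join ['\n'] ((lsplit cs).1 :: ((lsplit cs).2).map pvF) := by
  induction cs with
  | nil =>
    constructor <;>
      simp [demoteGo, lsplit, pvF, PySem.Chars.startswith,
        PySem.Chars.join_singleton]
  | cons c rest ih =>
    obtain ⟨ihT, ihF⟩ := ih
    by_cases hc : c = '\n'
    · subst hc
      have hs : lsplit ('\n' :: rest) = ([], (lsplit rest).1 :: (lsplit rest).2) := by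
        simp [lsplit]
      constructor
      · rw [show demoteGo true ('\n' :: rest) = '\n' :: demoteGo true rest by
            simp [demoteGo]]
        rw [hs]
        simp only []
        rw [show pvF [] = [] by simp [pvF, PySem.Chars.startswith, List.isPrefixOf]]
        rw [List.map_cons, join_nil_cons, ihT]
      · rw [show demoteGo false ('\n' :: rest) = '\n' :: demoteGo true rest by
            simp [demoteGo]]
        rw [hs]
        rw [List.map_cons, join_nil_cons, ihT]
    · have hs : lsplit (c :: rest) = (c :: (lsplit rest).1, (lsplit rest).2) := by
        simp [lsplit, hc]
      have hflag : (c == '\n') = false := by simp [hc]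
      constructor
      · rw [hs]
        by_cases hh : c = '#'
        · subst hh
          by_cases hp : (rest.head? == some '#') = true
          · -- next char is '#': no insertion on either side
            rw [show demoteGo true ('#' :: rest) = '#' :: demoteGo false rest by
                simp [demoteGo, hp, hflag]]
            rw [show pvF ('#' :: (lsplit rest).1) = '#' :: (lsplit rest).1 by
                simp [pvF, PySem.Chars.startswith, List.isPrefixOf, prefix_hash, head_hash, hp]]
            rw [join_cons_head, ihF]
          · rw [show demoteGo true ('#' :: rest) = '#' :: '#' :: demoteGo false rest by
                simp [demoteGo, hp, hflag]]
            rw [show pvF ('#' :: (lsplit rest).1) = '#' :: '#' :: (lsplit rest).1 by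
                simp [pvF, PySem.Chars.startswith, List.isPrefixOf, prefix_hash, head_hash, hp]]
            rw [join_cons_head, join_cons_head, ihF]
        · rw [show demoteGo true (c :: rest) = c :: demoteGo false rest by
              simp [demoteGo, hh, hflag]]
          rw [show pvF (c :: (lsplit rest).1) = c :: (lsplit rest).1 by
              simp [pvF, PySem.Chars.startswith, List.isPrefixOf, Ne.symm hh]]
          rw [join_cons_head, ihF]
      · rw [hs]
        rw [show demoteGo false (c :: rest) = c :: demoteGo false rest by
            simp [demoteGo, hflag]]
        rw [join_cons_head, ihF]

-- ===== VERDICT (by name: the statement is the Claim_ definition above) =====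
theorem demote_headings_spec : Claim_equal_demote_headings := by
  intro content _
  show String.ofList (PySem.Chars.join ['\n']
      (List.foldl (fun r x => r ++ [pvF x]) []
        (PySem.Chars.splitOn content.toList ['\n']))) =
    String.ofList (demoteGo true content.toList)
  rw [splitOn_eq, foldl_append_singleton pvF, List.nil_append, List.map_cons,
    (demoteGo_eq content.toList).1]
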